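-- pv_equiv track=rewrite | github.com/lar-sal/PersHomLoc | generalized_dijkstra.py | cycle_in_path
-- ===== SOURCE A (Python) =====
-- def cycle_in_path(path):
--     """
--     Check if the path already has a cycle, and can therefore not be part of a solution
--     Just reduction algorithm described in Edelsbrunner-Harer which terminates if a column is zero
--     Returns the zero-column index, so can be used to finding a target (column that can be summed to zero)
--     """
--     R= [sorted(list(p)) for p in path]
--     low_one = [r[0] for r in R]
--     D=[]
--     while R != D:
--         D = R.copy()
--         for j, r in enumerate(R):
--             if r == []:
--                 return (j)
--             while low_one.index(low_one[j]) != j: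
--                 l = low_one.index(low_one[j])
--                 symdif = set(R[j]).symmetric_difference(set(R[l]))
--                 R[j] = sorted(list(symdif))
--                 if R[j] == []:
--                     return (j)
--                 low_one[j] = R[j][0]
--     return (-1)
-- ===== SOURCE B (Python) =====
-- def cycle_in_path(path):
--     """Same result as A: standard left-to-right reduction keeping a low->column
--     pivot dictionary, so the pivot lookup is O(1) instead of a list .index scan."""
--     pivots = {}
--     for j, p in enumerate(path):
--         col = set(p)
--         while col:
--             low = min(col)
--             if low in pivots:
--                 col = col ^ pivots[low]
--             else:
--                 pivots[low] = col
--                 break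
--         else:
--             return j
--     return -1
-- ===== Notes on version B (the rewrite author's own statement) =====
-- stated objective: faster
-- what changed: B replaces A's repeated low_one.index list scans and the outer fixpoint loop (re-running full passes until R stops changing) by a single left-to-right pass that keeps a low->reduced-column pivot dictionary, so each pivot lookup is O(1) and no second pass or list copies/comparisons are needed.
import Mathlib
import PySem

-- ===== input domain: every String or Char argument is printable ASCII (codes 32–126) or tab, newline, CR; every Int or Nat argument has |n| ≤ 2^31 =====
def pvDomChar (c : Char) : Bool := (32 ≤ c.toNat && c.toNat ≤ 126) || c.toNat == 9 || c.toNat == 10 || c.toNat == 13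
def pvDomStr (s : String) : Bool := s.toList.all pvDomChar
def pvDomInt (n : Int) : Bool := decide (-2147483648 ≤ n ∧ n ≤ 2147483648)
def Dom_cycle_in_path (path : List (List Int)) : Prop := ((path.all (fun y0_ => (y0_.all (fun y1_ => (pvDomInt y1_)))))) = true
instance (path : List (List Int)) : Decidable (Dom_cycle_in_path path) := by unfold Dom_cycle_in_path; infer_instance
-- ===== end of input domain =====

-- B replaces A's list .index pivot scans and fixpoint re-passes by one left-to-right pass
-- with a low->column pivot dictionary (same return value on Pre_; A's IndexError inputs excluded).

-- ===== PORT A =====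
-- sorted(list(p)) on ints
def pySortInt (l : List Int) : List Int := PySem.List.sorted l (fun x => x) false

-- sorted(list(set(a).symmetric_difference(set(b)))) — sorted of a set without key is exact
def aSymdif (a b : List Int) : List Int :=
  pySortInt (PySem.Set.symmDiff (PySem.Set.ofList a) (PySem.Set.ofList b))

-- the inner 'while low_one.index(low_one[j]) != j' loop; fuel only makes it total
-- (proved unreachable at 0 under Pre_); Sum.inl = 'return j', Sum.inr = updated (R, low_one)
def aInner : Nat → List (List Int) → List Int → Nat → Sum Int (List (List Int) × List Int)
  | 0, R, low, _ => Sum.inr (R, low)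
  | fuel+1, R, low, j =>
    match PySem.List.index? low (low.getD j 0) with
    | none => Sum.inr (R, low)   -- unreachable: low_one[j] is in low_one
    | some l =>
      if l = j then Sum.inr (R, low)
      else
        let c := aSymdif (R.getD j []) (R.getD l [])
        if c = [] then Sum.inl (Int.ofNat j)
        else aInner fuel (R.set j c) (low.set j (c.headD 0)) j

-- the 'for j, r in enumerate(R)' loop (k = remaining indices)
def aFor (fI : Nat) : Nat → Nat → List (List Int) → List Int → Sum Int (List (List Int) × List Int)
  | 0, _, R, low => Sum.inr (R, low)
  | k+1, j, R, low =>
    if R.getD j [] = [] then Sum.inl (Int.ofNat j)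
    else
      match aInner fI R low j with
      | Sum.inl v => Sum.inl v
      | Sum.inr (R', low') => aFor fI k (j+1) R' low'

-- the outer 'while R != D' loop; D is the previous pass's copy of R
def aWhile (fI : Nat) : Nat → List (List Int) → List Int → List (List Int) → Int
  | 0, _, _, _ => -1   -- fuel guard, proved unreachable under Pre_
  | fuel+1, R, low, D =>
    if R = D then -1
    else
      match aFor fI R.length 0 R low with
      | Sum.inl v => v
      | Sum.inr (R', low') => aWhile fI fuel R' low' R

def cycle_in_path (path : List (List Int)) : Int :=
  let R := path.map pySortInt
  -- low_one = [r[0] for r in R]; Python raises IndexError when r = [] (excluded by Pre_)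
  let low := R.map (fun r => r.headD 0)
  aWhile (path.flatten.length + 1) (path.flatten.length + 3) R low []

-- ===== PORT B =====
-- Source B's 'while col:' reduction against the pivot dict; fuel only makes it total;
-- Sum.inl () = the while loop ran off the empty column ('else: return j')
def bInner : Nat → PySem.Dict Int (PySem.Set Int) → PySem.Set Int → Sum Unit (PySem.Dict Int (PySem.Set Int))
  | 0, piv, _ => Sum.inr piv   -- fuel guard, unreachable
  | fuel+1, piv, col =>
    if col = [] then Sum.inl ()
    else
      match PySem.List.min? col (fun x => x) with
      | none => Sum.inl ()   -- unreachable: col ≠ []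
      | some low =>
        match piv.get? low with
        | some pc => bInner fuel piv (PySem.Set.symmDiff col pc)
        | none => Sum.inr (piv.insert low col)

-- Source B's 'for j, p in enumerate(path)'
def bLoop (fI : Nat) : List (List Int) → Nat → PySem.Dict Int (PySem.Set Int) → Int
  | [], _, _ => -1
  | p :: rest, j, piv =>
    match bInner fI piv (PySem.Set.ofList p) with
    | Sum.inl () => Int.ofNat j
    | Sum.inr piv' => bLoop fI rest (j+1) piv'

def cycle_in_path_alt (path : List (List Int)) : Int :=
  bLoop (path.flatten.length + 1) path 0 PySem.Dict.empty

-- ===== PRECONDITION & SPEC =====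
-- Pre_ excludes exactly the inputs where A raises IndexError: a path containing an empty column
def Pre_cycle_in_path (path : List (List Int)) : Prop := ∀ p ∈ path, p ≠ []
instance (path : List (List Int)) : Decidable (Pre_cycle_in_path path) := by
  unfold Pre_cycle_in_path; infer_instance
def pvWitness_cycle_in_path : List (List Int) := [[1, 2], [2, 3], [1, 3]]

def Spec_cycle_in_path (path : List (List Int)) (out : Int) : Prop := out = cycle_in_path_alt path
instance (path : List (List Int)) (out : Int) : Decidable (Spec_cycle_in_path path out) := by
  unfold Spec_cycle_in_path; infer_instance

-- ===== CLAIM (what is proved, stated in full; the proofs are below) =====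
def Claim_equal_cycle_in_path : Prop := ∀ (path : List (List Int)), Dom_cycle_in_path path → Pre_cycle_in_path path → Spec_cycle_in_path path (cycle_in_path path)

-- ===== LEMMAS AND PROOFS =====

-- a nonempty (· ≤ ·)-sorted list's head is a minimum
lemma head_min_of_sorted (l : List Int) (hp : l.Pairwise (· ≤ ·)) (hne : l ≠ []) :
    l.headD 0 ∈ l ∧ ∀ x ∈ l, l.headD 0 ≤ x := by
  cases l with
  | nil => exact absurd rfl hne
  | cons a t =>
    refine ⟨List.mem_cons_self, ?_⟩
    intro x hx
    rcases List.mem_cons.1 hx with h | h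
    · simp [h]
    · exact (List.pairwise_cons.1 hp).1 x h

lemma mem_headD (l : List Int) (hne : l ≠ []) : l.headD 0 ∈ l := by
  cases l with
  | nil => exact absurd rfl hne
  | cons a t => exact List.mem_cons_self

-- min? with identity key returns the minimum value
lemma min?_eq_of (col : List Int) (v : Int) (hv : v ∈ col) (hmin : ∀ x ∈ col, v ≤ x) :
    PySem.List.min? col (fun x => x) = some v := by
  cases h : PySem.List.min? col (fun x => x) with
  | none => exact absurd ((PySem.List.min?_eq_none_iff col (fun x => x)).1 h ▸ hv) (List.not_mem_nil)
  | some m =>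
    have hm := PySem.List.min?_mem h
    have := PySem.List.min?_isMin h v hv
    have := hmin m hm
    simp only [le_antisymm ‹(fun x => x) m ≤ (fun x => x) v› ‹v ≤ m›]

-- first-occurrence characterisation of list.index
lemma index?_first (low : List Int) (k : Nat) (hk : k < low.length)
    (hprev : ∀ i, i < k → low.getD i 0 ≠ low.getD k 0) :
    PySem.List.index? low (low.getD k 0) = some k := by
  rw [PySem.List.index?_eq_some_iff]
  refine ⟨low.take k, low.drop (k+1), ?_, ?_, ?_⟩
  · rw [List.getD_eq_getElem low 0 hk]
    conv_lhs => rw [← List.take_append_drop k low]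
    rw [← List.getElem_cons_drop hk]
  · simp [List.length_take, Nat.min_eq_left (Nat.le_of_lt hk)]
  · intro hmem
    obtain ⟨i, hi, hval⟩ := List.getElem_of_mem hmem
    have hlt : i < k := by
      have := hi; simp [List.length_take] at this; omega
    have : low[i] = low.getD k 0 := by
      rw [← hval]; rw [List.getElem_take]
    exact hprev i hlt (by rw [List.getD_eq_getElem low 0 (by omega), this])

lemma mem_aSymdif (a b : List Int) (x : Int) :
    x ∈ aSymdif a b ↔ ((x ∈ a ∧ x ∉ b) ∨ (x ∈ b ∧ x ∉ a)) := by
  simp [aSymdif, pySortInt, PySem.List.mem_sorted, PySem.Set.mem_symmDiff, PySem.Set.mem_ofList]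

lemma pairwise_aSymdif (a b : List Int) : (aSymdif a b).Pairwise (· ≤ ·) := by
  simpa using PySem.List.sorted_pairwise (xs := PySem.Set.symmDiff (PySem.Set.ofList a) (PySem.Set.ofList b)) (key := fun x => x)

-- number of distinct elements of path.flatten that are ≥ v : the inner-loop measure
def mcount (path : List (List Int)) (v : Int) : Nat :=
  ((PySem.List.dedup path.flatten).filter (fun u => decide (v ≤ u))).length

lemma mcount_lt (path : List (List Int)) (v w : Int)
    (hvU : v ∈ path.flatten) (hvw : v < w) : mcount path w < mcount path v := by
  have hvd : v ∈ PySem.List.dedup path.flatten := by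
    exact (PySem.List.mem_dedup _ _).2 hvU
  obtain ⟨d1, d2, hd⟩ := List.append_of_mem hvd
  unfold mcount
  rw [hd]
  simp only [List.filter_append, List.filter_cons, List.length_append]
  have h1 : (List.filter (fun u => decide (w ≤ u)) d1).length ≤ (List.filter (fun u => decide (v ≤ u)) d1).length := by
    simp only [List.countP_eq_length_filter.symm]
    exact List.countP_mono_left (fun a _ h => by simp at h ⊢; omega)
  have h2 : (List.filter (fun u => decide (w ≤ u)) d2).length ≤ (List.filter (fun u => decide (v ≤ u)) d2).length := by
    simp only [List.countP_eq_length_filter.symm]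
    exact List.countP_mono_left (fun a _ h => by simp at h ⊢; omega)
  have : ¬ (w ≤ v) := by omega
  simp [this]
  omega

lemma mcount_le (path : List (List Int)) (v : Int) : mcount path v ≤ path.flatten.length := by
  unfold mcount
  calc _ ≤ (PySem.List.dedup path.flatten).length := List.length_filter_le _ _
    _ ≤ _ := by rw [PySem.List.dedup_eq_ofList]; exact PySem.Set.length_ofList_le _

lemma mcount_pos (path : List (List Int)) (v : Int) (hvU : v ∈ path.flatten) :
    1 ≤ mcount path v := by
  have hvd : v ∈ PySem.List.dedup path.flatten := by
    exact (PySem.List.mem_dedup _ _).2 hvU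
  have : v ∈ (PySem.List.dedup path.flatten).filter (fun u => decide (v ≤ u)) :=
    List.mem_filter.2 ⟨hvd, by simp⟩
  unfold mcount
  exact List.length_pos_of_mem this

-- a well-formed column
def GoodCol (path : List (List Int)) (l : List Int) : Prop :=
  l ≠ [] ∧ l.Pairwise (· ≤ ·) ∧ ∀ x ∈ l, x ∈ path.flatten

-- invariant tying A's (R, low_one) after processing columns < j to B's pivot dict
def InvBase (path : List (List Int)) (j : Nat) (R : List (List Int)) (low : List Int)
    (piv : PySem.Dict Int (PySem.Set Int)) : Prop :=
  R.length = path.length ∧ low.length = path.length ∧ j ≤ path.length ∧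
  (∀ i, i < path.length → GoodCol path (R.getD i []) ∧ low.getD i 0 = (R.getD i []).headD 0) ∧
  (∀ i1 i2, i1 < i2 → i2 < j → low.getD i1 0 ≠ low.getD i2 0) ∧
  (∀ v : Int,
    match piv.get? v with
    | none => ∀ i, i < j → low.getD i 0 ≠ v
    | some s => ∃ i, i < j ∧ low.getD i 0 = v ∧ s.Nodup ∧ (∀ x, x ∈ s ↔ x ∈ R.getD i []))

-- columns not yet processed are still sorted(path[i])
def InvUn (path : List (List Int)) (j : Nat) (R : List (List Int)) : Prop :=
  ∀ i, j ≤ i → i < path.length → R.getD i [] = pySortInt (path.getD i [])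

lemma getD_set_self {α : Type} (l : List α) (j : Nat) (a d : α) (h : j < l.length) :
    (l.set j a).getD j d = a := by
  rw [List.getD_eq_getElem _ _ (by simpa using h)]
  simp

lemma getD_set_ne {α : Type} (l : List α) (i j : Nat) (a d : α) (h : i ≠ j) :
    (l.set j a).getD i d = l.getD i d := by
  by_cases hi : i < l.length
  · rw [List.getD_eq_getElem _ _ (by simpa using hi), List.getD_eq_getElem _ _ hi]
    simp [h.symm]
  · rw [List.getD_eq_default _ _ (by simpa using hi), List.getD_eq_default _ _ (by omega)]

-- one-step unfolding equations for the fueled inner loops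
lemma aInner_red (f : Nat) (R : List (List Int)) (low : List Int) (j i : Nat)
    (hidx : PySem.List.index? low (low.getD j 0) = some i) (hne : ¬ (i = j)) :
    aInner (f+1) R low j =
      (if aSymdif (R.getD j []) (R.getD i []) = [] then Sum.inl (Int.ofNat j)
       else aInner f (R.set j (aSymdif (R.getD j []) (R.getD i [])))
         (low.set j ((aSymdif (R.getD j []) (R.getD i [])).headD 0)) j) := by
  conv_lhs => rw [aInner.eq_def]
  simp only [hidx, hne, if_false]

lemma bInner_red (f : Nat) (piv : PySem.Dict Int (PySem.Set Int)) (col : List Int)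
    (v : Int) (s : PySem.Set Int) (hc : col ≠ [])
    (hmin : PySem.List.min? col (fun x => x) = some v) (hpg : piv.get? v = some s) :
    bInner (f+1) piv col = bInner f piv (PySem.Set.symmDiff col s) := by
  conv_lhs => rw [bInner.eq_def]
  simp only [if_neg hc, hmin, hpg]

lemma bInner_store (f : Nat) (piv : PySem.Dict Int (PySem.Set Int)) (col : List Int)
    (v : Int) (hc : col ≠ [])
    (hmin : PySem.List.min? col (fun x => x) = some v) (hpg : piv.get? v = none) :
    bInner (f+1) piv col = Sum.inr (piv.insert v col) := by
  conv_lhs => rw [bInner.eq_def]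
  simp only [if_neg hc, hmin, hpg]

-- lockstep simulation of A's inner while and B's inner while on column j
lemma sim_inner (path : List (List Int)) : ∀ (fuel j : Nat) R low piv (col : List Int),
    InvBase path j R low piv → InvUn path (j+1) R → j < path.length →
    col.Nodup → (∀ x, x ∈ col ↔ x ∈ R.getD j []) →
    mcount path ((R.getD j []).headD 0) < fuel →
    (aInner fuel R low j = Sum.inl (Int.ofNat j) ∧ bInner fuel piv col = Sum.inl ())
    ∨ (∃ R' low' piv', aInner fuel R low j = Sum.inr (R', low') ∧ bInner fuel piv col = Sum.inr piv'
        ∧ InvBase path (j+1) R' low' piv' ∧ InvUn path (j+1) R') := by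
  intro fuel
  induction fuel with
  | zero => intro j R low piv col _ _ _ _ _ hm; omega
  | succ f ih =>
    intro j R low piv col hB hU hj hnd hcol hm
    obtain ⟨hRlen, hLlen, hjle, hC4, hC5, hC7⟩ := hB
    obtain ⟨⟨hne, hpw, hsub⟩, hlowj⟩ := hC4 j hj
    have hmin := head_min_of_sorted (R.getD j []) hpw hne
    have hvU : (R.getD j []).headD 0 ∈ path.flatten := hsub _ hmin.1
    have hvcol : (R.getD j []).headD 0 ∈ col := (hcol _).2 hmin.1
    have hcolne : col ≠ [] := List.ne_nil_of_mem hvcol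
    have hminB : PySem.List.min? col (fun x => x) = some ((R.getD j []).headD 0) :=
      min?_eq_of col _ hvcol (fun x hx => hmin.2 x ((hcol x).1 hx))
    by_cases hex : ∃ i, i < j ∧ low.getD i 0 = (R.getD j []).headD 0
    · -- an earlier column has the same low: one reduction step, then induction
      obtain ⟨i, hij, hiv⟩ := hex
      have hijn : i < path.length := by omega
      have hidx : PySem.List.index? low (low.getD j 0) = some i := by
        rw [hlowj, ← hiv]
        exact index?_first low i (by omega) (fun i' h => hC5 i' i h hij)
      -- pivot dict lookup must hit the same column
      obtain ⟨s, hpg, hsnd, hsmem⟩ :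
          ∃ s, piv.get? ((R.getD j []).headD 0) = some s ∧ s.Nodup ∧
            (∀ x, x ∈ s ↔ x ∈ R.getD i []) := by
        have h7 := hC7 ((R.getD j []).headD 0)
        cases hpg : piv.get? ((R.getD j []).headD 0) with
        | none => rw [hpg] at h7; exact absurd hiv (h7 i hij)
        | some s =>
          rw [hpg] at h7
          obtain ⟨i2, hi2j, hi2v, hs1, hs2⟩ := h7
          have : i2 = i := by
            rcases lt_trichotomy i2 i with h | h | h
            · exact absurd (hi2v.trans hiv.symm) (hC5 i2 i h hij)
            · exact h
            · exact absurd (hiv.trans hi2v.symm) (hC5 i i2 h hi2j)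
          subst this
          exact ⟨s, rfl, hs1, hs2⟩
      obtain ⟨⟨hnei, hpwi, hsubi⟩, hlowi⟩ := hC4 i hijn
      have hmini := head_min_of_sorted (R.getD i []) hpwi hnei
      have hheadi : (R.getD i []).headD 0 = (R.getD j []).headD 0 := by rw [← hlowi, hiv]
      have hijne : ¬ (i = j) := by omega
      -- membership description of the symmetric difference
      have hcmem : ∀ x, x ∈ PySem.Set.symmDiff col s ↔
          x ∈ aSymdif (R.getD j []) (R.getD i []) := by
        intro x
        rw [PySem.Set.mem_symmDiff, mem_aSymdif]
        constructor
        · rintro (⟨h1, h2⟩ | ⟨h1, h2⟩)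
          · exact Or.inl ⟨(hcol x).1 h1, fun hx => h2 ((hsmem x).2 hx)⟩
          · exact Or.inr ⟨(hsmem x).1 h1, fun hx => h2 ((hcol x).2 hx)⟩
        · rintro (⟨h1, h2⟩ | ⟨h1, h2⟩)
          · exact Or.inl ⟨(hcol x).2 h1, fun hx => h2 ((hsmem x).1 hx)⟩
          · exact Or.inr ⟨(hsmem x).2 h1, fun hx => h2 ((hcol x).1 hx)⟩
      have hf1 : 1 ≤ f := by
        have := mcount_pos path _ hvU; omega
      by_cases hc : aSymdif (R.getD j []) (R.getD i []) = []
      · -- the column cancels: both return j / ()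
        left
        constructor
        · rw [aInner_red f R low j i hidx hijne, if_pos hc]
        · have hcol'nil : PySem.Set.symmDiff col s = [] := by
            rw [List.eq_nil_iff_forall_not_mem]
            intro x hx
            exact (List.eq_nil_iff_forall_not_mem.1 hc) x ((hcmem x).1 hx)
          obtain ⟨f', rfl⟩ : ∃ f', f = f' + 1 := ⟨f - 1, by omega⟩
          rw [bInner_red _ _ _ _ _ hcolne hminB hpg, hcol'nil]
          unfold bInner
          simp
      · -- a genuine reduction step: the new low strictly increases, recurse
        have hcne := hc
        have hgt : ∀ x ∈ aSymdif (R.getD j []) (R.getD i []), (R.getD j []).headD 0 < x := by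
          intro x hx
          rcases (mem_aSymdif _ _ x).1 hx with ⟨h1, h2⟩ | ⟨h1, h2⟩
          · rcases lt_or_eq_of_le (hmin.2 x h1) with h | h
            · exact h
            · exact absurd (h ▸ hheadi ▸ hmini.1) h2
          · rcases lt_or_eq_of_le (hheadi ▸ hmini.2 x h1) with h | h
            · exact h
            · exact absurd (h ▸ hmin.1) h2
        have hv' : (aSymdif (R.getD j []) (R.getD i [])).headD 0 ∈
            aSymdif (R.getD j []) (R.getD i []) := mem_headD _ hc
        have hvlt := hgt _ hv'
        have hmlt := mcount_lt path _ _ hvU hvlt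
        -- invariant for the updated state (same j, column j replaced)
        have hB' : InvBase path j (R.set j (aSymdif (R.getD j []) (R.getD i [])))
            (low.set j ((aSymdif (R.getD j []) (R.getD i [])).headD 0)) piv := by
          refine ⟨by simpa using hRlen, by simpa using hLlen, hjle, ?_, ?_, ?_⟩
          · intro i0 hi0
            by_cases hi0j : i0 = j
            · subst hi0j
              rw [getD_set_self _ _ _ _ (by omega), getD_set_self _ _ _ _ (by omega)]
              refine ⟨⟨hc, pairwise_aSymdif _ _, ?_⟩, rfl⟩
              intro x hx
              rcases (mem_aSymdif _ _ x).1 hx with ⟨h1, _⟩ | ⟨h1, _⟩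
              · exact hsub x h1
              · exact hsubi x h1
            · rw [getD_set_ne _ _ _ _ _ hi0j, getD_set_ne _ _ _ _ _ hi0j]
              exact hC4 i0 hi0
          · intro i1 i2 h12 h2j
            rw [getD_set_ne _ _ _ _ _ (by omega), getD_set_ne _ _ _ _ _ (by omega)]
            exact hC5 i1 i2 h12 h2j
          · intro w
            have h7 := hC7 w
            cases hw : piv.get? w with
            | none =>
              rw [hw] at h7
              intro i0 hi0
              rw [getD_set_ne _ _ _ _ _ (by omega)]
              exact h7 i0 hi0
            | some s0 =>
              rw [hw] at h7
              obtain ⟨i0, hi0, hv0, hn0, hm0⟩ := h7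
              exact ⟨i0, hi0, by rw [getD_set_ne _ _ _ _ _ (by omega)]; exact hv0, hn0,
                by rw [getD_set_ne _ _ _ _ _ (by omega)]; exact hm0⟩
        have hU' : InvUn path (j+1) (R.set j (aSymdif (R.getD j []) (R.getD i []))) := by
          intro i0 h1 h2
          rw [getD_set_ne _ _ _ _ _ (by omega)]
          exact hU i0 h1 h2
        have hndc : (PySem.Set.symmDiff col s).Nodup := PySem.Set.nodup_symmDiff _ _ hnd hsnd
        have hcolc : ∀ x, x ∈ PySem.Set.symmDiff col s ↔
            x ∈ (R.set j (aSymdif (R.getD j []) (R.getD i []))).getD j [] := by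
          intro x
          rw [getD_set_self _ _ _ _ (by omega)]
          exact hcmem x
        have hmc : mcount path
            (((R.set j (aSymdif (R.getD j []) (R.getD i []))).getD j []).headD 0) < f := by
          rw [getD_set_self _ _ _ _ (by omega)]
          omega
        have := ih j (R.set j (aSymdif (R.getD j []) (R.getD i [])))
          (low.set j ((aSymdif (R.getD j []) (R.getD i [])).headD 0)) piv
          (PySem.Set.symmDiff col s) hB' hU' hj hndc hcolc hmc
        rw [aInner_red f R low j i hidx hijne, if_neg hc,
          bInner_red _ _ _ _ _ hcolne hminB hpg]
        exact this
    · -- column j's low is fresh: A leaves the inner loop, B records the pivot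
      push Not at hex
      have hidx : PySem.List.index? low (low.getD j 0) = some j := by
        refine index?_first low j (by omega) (fun i' h heq => ?_)
        exact hex i' h (by rw [← hlowj]; exact heq)
      have hpg : piv.get? ((R.getD j []).headD 0) = none := by
        cases hw : piv.get? ((R.getD j []).headD 0) with
        | none => rfl
        | some s0 =>
          have h7 := hC7 ((R.getD j []).headD 0)
          rw [hw] at h7
          obtain ⟨i0, hi0, hv0, _⟩ := h7
          exact absurd hv0 (hex i0 hi0)
      right
      refine ⟨R, low, piv.insert ((R.getD j []).headD 0) col, ?_, ?_, ?_, hU⟩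
      · unfold aInner
        rw [hidx]
        simp
      · exact bInner_store _ _ _ _ hcolne hminB hpg
      · refine ⟨hRlen, hLlen, by omega, hC4, ?_, ?_⟩
        · intro i1 i2 h12 h2j
          rcases Nat.lt_or_ge i2 j with h | h
          · exact hC5 i1 i2 h12 h
          · have : i2 = j := by omega
            subst this
            rw [hlowj]
            exact hex i1 h12
        · intro w
          rw [PySem.Dict.get?_insert]
          by_cases hw : w = (R.getD j []).headD 0
          · subst hw
            simp only [if_pos]
            exact ⟨j, by omega, hlowj, hnd, hcol⟩
          · rw [if_neg hw]
            have h7 := hC7 w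
            cases hg : piv.get? w with
            | none =>
              rw [hg] at h7
              intro i0 hi0
              rcases Nat.lt_or_ge i0 j with h | h
              · exact h7 i0 h
              · have : i0 = j := by omega
                subst this
                rw [hlowj]
                exact fun hh => hw hh.symm
            | some s0 =>
              rw [hg] at h7
              obtain ⟨i0, hi0, rest⟩ := h7
              exact ⟨i0, by omega, rest⟩

-- lockstep simulation of one full pass of A's for-loop and B's single pass
lemma getD_map_pySort (path : List (List Int)) (i : Nat) (h : i < path.length) :
    (path.map pySortInt).getD i [] = pySortInt (path.getD i []) := by
  rw [List.getD_eq_getElem _ _ (by simpa using h), List.getD_eq_getElem _ _ h, List.getElem_map]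

lemma getD_map_head (R : List (List Int)) (i : Nat) (h : i < R.length) :
    (R.map (fun r => r.headD 0)).getD i 0 = (R.getD i []).headD 0 := by
  rw [List.getD_eq_getElem _ _ (by simpa using h), List.getD_eq_getElem _ _ h, List.getElem_map]

lemma sim_loop (path : List (List Int)) (fI : Nat)
    (hfI : ∀ v, v ∈ path.flatten → mcount path v < fI) : ∀ (k j : Nat) R low piv,
    j + k = path.length → InvBase path j R low piv → InvUn path j R →
    (∃ v, aFor fI k j R low = Sum.inl v ∧ bLoop fI (path.drop j) j piv = v)
    ∨ (∃ R' low' piv', aFor fI k j R low = Sum.inr (R', low')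
        ∧ bLoop fI (path.drop j) j piv = -1
        ∧ InvBase path path.length R' low' piv') := by
  intro k
  induction k with
  | zero =>
    intro j R low piv hj hB hU
    right
    refine ⟨R, low, piv, rfl, ?_, by rwa [← hj]⟩
    rw [List.drop_eq_nil_of_le (by omega)]
    rfl
  | succ k ih =>
    intro j R low piv hj hB hU
    have hjn : j < path.length := by omega
    have hC4 := hB.2.2.2.1
    have hne : R.getD j [] ≠ [] := (hC4 j hjn).1.1
    have hRj : R.getD j [] = pySortInt (path.getD j []) := hU j le_rfl hjn
    have hcol : ∀ x, x ∈ PySem.Set.ofList (path.getD j []) ↔ x ∈ R.getD j [] := by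
      intro x
      rw [PySem.Set.mem_ofList, hRj]
      exact (PySem.List.mem_sorted (xs := path.getD j []) (key := fun y => y)
        (rev := false) (x := x)).symm
    have hmB : mcount path ((R.getD j []).headD 0) < fI :=
      hfI _ ((hC4 j hjn).1.2.2 _ (mem_headD _ hne))
    have hsim := sim_inner path fI j R low piv (PySem.Set.ofList (path.getD j []))
      hB (fun i h1 h2 => hU i (by omega) h2) hjn (PySem.Set.nodup_ofList _) hcol hmB
    have hdrop : path.drop j = path.getD j [] :: path.drop (j+1) := by
      rw [List.getD_eq_getElem _ _ hjn]
      exact List.drop_eq_getElem_cons hjn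
    have hforA : aFor fI (k+1) j R low =
        match aInner fI R low j with
        | Sum.inl v => Sum.inl v
        | Sum.inr (R', low') => aFor fI k (j+1) R' low' := by
      conv_lhs => rw [aFor.eq_def]
      simp
      intro h
      exact absurd h hne
    have hloopB : bLoop fI (path.drop j) j piv =
        match bInner fI piv (PySem.Set.ofList (path.getD j [])) with
        | Sum.inl () => Int.ofNat j
        | Sum.inr piv' => bLoop fI (path.drop (j+1)) (j+1) piv' := by
      rw [hdrop]
      rfl
    rcases hsim with ⟨ha, hb⟩ | ⟨R', low', piv', ha, hb, hB', hU'⟩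
    · left
      exact ⟨Int.ofNat j, by rw [hforA, ha], by rw [hloopB, hb]⟩
    · have hforA' : aFor fI (k+1) j R low = aFor fI k (j+1) R' low' := by rw [hforA, ha]
      have hloopB' : bLoop fI (path.drop j) j piv = bLoop fI (path.drop (j+1)) (j+1) piv' := by
        rw [hloopB, hb]
      rcases ih (j+1) R' low' piv' (by omega) hB' hU' with ⟨v, h1, h2⟩ | ⟨R2, low2, piv2, h1, h2, h3⟩
      · exact Or.inl ⟨v, by rw [hforA', h1], by rw [hloopB', h2]⟩
      · exact Or.inr ⟨R2, low2, piv2, by rw [hforA', h1], by rw [hloopB', h2], h3⟩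

-- once all lows are distinct, A's next pass changes nothing
lemma aFor_noop (fI : Nat) (R : List (List Int)) (low : List Int)
    (hlen : low.length = R.length)
    (hdist : ∀ i1 i2, i1 < i2 → i2 < R.length → low.getD i1 0 ≠ low.getD i2 0)
    (hne : ∀ i, i < R.length → R.getD i [] ≠ []) (hfI : 1 ≤ fI) :
    ∀ k j, j + k = R.length → aFor fI k j R low = Sum.inr (R, low) := by
  intro k
  induction k with
  | zero => intro j hj; rfl
  | succ k ih =>
    intro j hj
    have hjR : j < R.length := by omega
    obtain ⟨f, rfl⟩ : ∃ f, fI = f + 1 := ⟨fI - 1, by omega⟩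
    have hidx : PySem.List.index? low (low.getD j 0) = some j :=
      index?_first low j (by omega) (fun i hi => hdist i j hi hjR)
    have hstep : aInner (f+1) R low j = Sum.inr (R, low) := by
      unfold aInner
      rw [hidx]
      simp
    unfold aFor
    rw [if_neg (hne j hjR), hstep]
    exact ih (j+1) (by omega)

lemma aWhile_end (fI : Nat) (R : List (List Int)) (low : List Int)
    (hlen : low.length = R.length)
    (hdist : ∀ i1 i2, i1 < i2 → i2 < R.length → low.getD i1 0 ≠ low.getD i2 0)
    (hne : ∀ i, i < R.length → R.getD i [] ≠ []) (hfI : 1 ≤ fI) :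
    ∀ (f : Nat) (D : List (List Int)), aWhile fI (f+2) R low D = -1 := by
  intro f D
  have hpass := aFor_noop fI R low hlen hdist hne hfI R.length 0 (by omega)
  unfold aWhile
  by_cases hRD : R = D
  · rw [if_pos hRD]
  · rw [if_neg hRD, hpass]
    simp only []
    unfold aWhile
    simp

-- ===== VERDICT (by name: the statement is the Claim_ definition above) =====
theorem cycle_in_path_spec : Claim_equal_cycle_in_path := by
  intro path _ hPre
  unfold Spec_cycle_in_path cycle_in_path cycle_in_path_alt
  simp only []
  have hfI : ∀ v, v ∈ path.flatten → mcount path v < path.flatten.length + 1 :=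
    fun v _ => by have := mcount_le path v; omega
  have hU0 : InvUn path 0 (path.map pySortInt) :=
    fun i _ h2 => getD_map_pySort path i h2
  have hB0 : InvBase path 0 (path.map pySortInt)
      ((path.map pySortInt).map (fun r => r.headD 0)) PySem.Dict.empty := by
    refine ⟨by simp, by simp, by omega, ?_, fun i1 i2 _ h => absurd h (Nat.not_lt_zero i2), ?_⟩
    · intro i hi
      rw [getD_map_pySort path i hi, getD_map_head _ i (by simpa using hi),
        getD_map_pySort path i hi]
      have hpmem : path.getD i [] ∈ path := by
        rw [List.getD_eq_getElem _ _ hi]; exact List.getElem_mem hi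
      refine ⟨⟨?_, ?_, ?_⟩, rfl⟩
      · rw [Ne, pySortInt, PySem.List.sorted_eq_nil_iff]
        exact hPre _ hpmem
      · simpa using PySem.List.sorted_pairwise (xs := path.getD i []) (key := fun y => y)
      · intro x hx
        rw [List.mem_flatten]
        exact ⟨path.getD i [], hpmem,
          (PySem.List.mem_sorted (xs := path.getD i []) (key := fun y => y)
            (rev := false) (x := x)).1 hx⟩
    · intro v
      rw [PySem.Dict.get?_empty]
      exact fun i hi => absurd hi (Nat.not_lt_zero i)
  rcases List.eq_nil_or_concat path with rfl | hne0
  · rfl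
  · have hpne : path ≠ [] := by rcases hne0 with ⟨l, a, rfl⟩; simp
    have hRne : path.map pySortInt ≠ [] := by simpa using hpne
    have hstep : aWhile (path.flatten.length + 1) (path.flatten.length + 3)
        (path.map pySortInt) ((path.map pySortInt).map (fun r => r.headD 0)) [] =
        match aFor (path.flatten.length + 1) path.length 0 (path.map pySortInt)
            ((path.map pySortInt).map (fun r => r.headD 0)) with
        | Sum.inl v => v
        | Sum.inr (R', low') => aWhile (path.flatten.length + 1) (path.flatten.length + 2)
            R' low' (path.map pySortInt) := by
      conv_lhs => rw [show path.flatten.length + 3 = (path.flatten.length + 2) + 1 from rfl,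
        aWhile.eq_def]
      simp [hRne]
    rcases sim_loop path (path.flatten.length + 1) hfI path.length 0 (path.map pySortInt)
        ((path.map pySortInt).map (fun r => r.headD 0)) PySem.Dict.empty (by omega) hB0 hU0 with
      ⟨v, h1, h2⟩ | ⟨R', low', piv', h1, h2, hB'⟩
    · rw [hstep, h1]
      exact h2.symm
    · rw [hstep, h1]
      simp only []
      obtain ⟨hR'len, hlow'len, _, hC4', hC5', _⟩ := hB'
      rw [aWhile_end (path.flatten.length + 1) R' low' (by omega)
        (fun i1 i2 ha hb => hC5' i1 i2 ha (by omega))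
        (fun i hi => (hC4' i (by omega)).1.1) (by omega) path.flatten.length
        (path.map pySortInt)]
      exact h2.symm
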